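-- pv_equiv track=rewrite | github.com/DhruvTrehan03/Bending | BendingSim/utils.py | clean_cfg_string
-- ===== SOURCE A (Python) =====
-- def clean_cfg_string(value, default=""):
--     if value is None:
--         return str(default).strip().lower()
--     text = str(value)
--     for sep in ("#", ";"):
--         if sep in text:
--             text = text.split(sep, 1)[0]
--     return text.strip().lower()
-- ===== SOURCE B (Python) =====
-- def clean_cfg_string(value, default=""):
--     if value is None:
--         return str(default).strip().lower()
--     text = str(value)
--     end = len(text)
--     for i, ch in enumerate(text):
--         if ch in "#;":
--             end = i
--             break
--     return text[:end].strip().lower()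
-- ===== Notes on version B (the rewrite author's own statement) =====
-- stated objective: alternative
-- what changed: Replaces the two separator-driven split passes (split at '#', then split the prefix at ';') by a single left-to-right character scan that stops at the first '#' or ';' and truncates there.
import Mathlib
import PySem

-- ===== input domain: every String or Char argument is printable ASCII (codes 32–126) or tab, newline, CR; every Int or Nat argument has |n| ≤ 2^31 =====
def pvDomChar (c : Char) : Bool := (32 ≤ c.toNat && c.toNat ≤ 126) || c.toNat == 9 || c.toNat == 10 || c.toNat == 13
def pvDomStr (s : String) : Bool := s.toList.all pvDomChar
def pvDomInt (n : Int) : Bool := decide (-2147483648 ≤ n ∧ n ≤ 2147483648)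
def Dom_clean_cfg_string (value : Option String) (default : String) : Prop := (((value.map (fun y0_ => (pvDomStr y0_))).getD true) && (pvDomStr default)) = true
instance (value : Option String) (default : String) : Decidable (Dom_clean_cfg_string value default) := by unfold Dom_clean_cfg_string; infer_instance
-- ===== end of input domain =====

-- B replaces A's two sequential split-at-separator passes by one character scan
-- that truncates at the first '#' or ';' (alternative decomposition, same cost).


-- ===== PORT A =====
-- hand port of text.split(sep, 1) for a one-character separator sep:
-- returns (piece before the first sep, rest after it if sep occurs); [0] is .1
def pvSplitOnce : List Char → Char → List Char × Option (List Char)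
  | [], _ => ([], none)
  | x :: xs, c =>
    if x = c then ([], some xs)
    else
      let r := pvSplitOnce xs c
      (x :: r.1, r.2)

-- one iteration of A's 'for sep in ("#", ";")' body
def pvCleanStep (t : List Char) (c : Char) : List Char :=
  if PySem.Chars.isIn [c] t then (pvSplitOnce t c).1 else t

def clean_cfg_string (value : Option String) (default : String) : String :=
  match value with
  | none => PySem.Str.lower (PySem.Str.strip default)
  | some v =>
    let text := v.toList
    let text := List.foldl pvCleanStep text ['#', ';']
    String.ofList (PySem.Chars.lower (PySem.Chars.strip text))

-- ===== PORT B =====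
-- port of B's 'for i, ch in enumerate(text): if ch in "#;": end = i; break'
-- (returns the index of the first '#' or ';' if any)
def pvFirstIdx : List Char → Nat → Option Nat
  | [], _ => none
  | ch :: rest, i => if ch == '#' || ch == ';' then some i else pvFirstIdx rest (i + 1)

def clean_cfg_string_alt (value : Option String) (default : String) : String :=
  match value with
  | none => PySem.Str.lower (PySem.Str.strip default)
  | some v =>
    let t := v.toList
    let endIdx := (pvFirstIdx t 0).getD t.length
    -- text[:end] with 0 ≤ end ≤ len(text) is List.take end
    String.ofList (PySem.Chars.lower (PySem.Chars.strip (t.take endIdx)))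

-- ===== PRECONDITION & SPEC =====
def Spec_clean_cfg_string (value : Option String) (default : String) (out : String) : Prop := out = clean_cfg_string_alt value default
instance (value : Option String) (default : String) (out : String) : Decidable (Spec_clean_cfg_string value default out) := by unfold Spec_clean_cfg_string; infer_instance

-- ===== CLAIM (what is proved, stated in full; the proofs are below) =====
def Claim_equal_clean_cfg_string : Prop := ∀ (value : Option String) (default : String), Dom_clean_cfg_string value default → Spec_clean_cfg_string value default (clean_cfg_string value default)

-- ===== LEMMAS AND PROOFS =====

lemma pvSplitOnce_fst (t : List Char) (c : Char) :
    (pvSplitOnce t c).1 = t.takeWhile (fun x => x != c) := by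
  induction t with
  | nil => rfl
  | cons x xs ih =>
    simp only [pvSplitOnce, List.takeWhile_cons]
    by_cases h : x = c
    · simp [h]
    · simp [h, ih]

lemma pvCleanStep_eq (t : List Char) (c : Char) :
    pvCleanStep t c = t.takeWhile (fun x => x != c) := by
  unfold pvCleanStep
  by_cases h : PySem.Chars.isIn [c] t = true
  · simp [h, pvSplitOnce_fst]
  · simp only [h]
    have hnin : c ∉ t := by
      intro hmem
      apply h
      rw [PySem.Chars.isIn_iff_infix]
      obtain ⟨s1, s2, rfl⟩ := List.append_of_mem hmem
      exact ⟨s1, s2, by simp⟩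
    simp only [Bool.not_eq_true] at h
    simp only [Bool.false_eq_true, if_false]
    symm
    rw [List.takeWhile_eq_self_iff]
    intro a ha
    simp only [bne_iff_ne, ne_eq]
    intro rfl
    exact hnin ha

lemma pvFirstIdx_shift (t : List Char) (i : Nat) :
    pvFirstIdx t i = (pvFirstIdx t 0).map (· + i) := by
  induction t generalizing i with
  | nil => rfl
  | cons x xs ih =>
    simp only [pvFirstIdx]
    by_cases h : (x == '#' || x == ';') = true
    · simp [h]
    · rw [ih (i + 1), ih 1]
      cases pvFirstIdx xs 0
      · simp [h]
      · simp [h]; omega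

lemma pvFirstIdx_take (t : List Char) :
    t.take ((pvFirstIdx t 0).getD t.length)
      = t.takeWhile (fun x => !(x == '#' || x == ';')) := by
  induction t with
  | nil => rfl
  | cons x xs ih =>
    simp only [pvFirstIdx, List.takeWhile_cons]
    by_cases h : (x == '#' || x == ';') = true
    · simp [h]
    · simp only [h, Bool.not_false]
      rw [pvFirstIdx_shift xs 1]
      cases hfi : pvFirstIdx xs 0 with
      | none => simp [hfi] at ih ⊢; simpa using ih
      | some k => simp [hfi] at ih ⊢; simpa using ih

lemma pvTakeWhile_two (l : List Char) :
    (l.takeWhile (fun x => x != '#')).takeWhile (fun x => x != ';')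
      = l.takeWhile (fun x => !(x == '#' || x == ';')) := by
  induction l with
  | nil => rfl
  | cons x xs ih =>
    by_cases h1 : x = '#'
    · simp [h1]
    · by_cases h2 : x = ';' <;> simp [h1, h2, ih]

-- ===== VERDICT (by name: the statement is the Claim_ definition above) =====
theorem clean_cfg_string_spec : Claim_equal_clean_cfg_string := by
  intro value default _
  unfold Spec_clean_cfg_string clean_cfg_string clean_cfg_string_alt
  cases value with
  | none => rfl
  | some v =>
    simp only [List.foldl]
    rw [pvCleanStep_eq, pvCleanStep_eq, pvTakeWhile_two, pvFirstIdx_take]
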